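-- pv_equiv track=rewrite | github.com/RodrigoGoni/hanoi_tower | main.py | is_valid_hanoi_state
-- ===== SOURCE A (Python) =====
-- def is_valid_hanoi_state(peg_1, peg_2, peg_3, max_disks):
--     # Combine all disks from the three pegs
--     all_disks = peg_1 + peg_2 + peg_3
--
--     # Check that each disk is unique and in the correct range
--     if sorted(all_disks) != list(range(1, max_disks + 1)):
--         return False
--
--     # Check that each peg is in strictly decreasing order
--     for peg in [peg_1, peg_2, peg_3]:
--         if peg != sorted(peg, reverse=True):
--             return False
--
--     return True
-- ===== SOURCE B (Python) =====
-- def _strictly_decreasing(peg):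
--     return all(peg[i] > peg[i + 1] for i in range(len(peg) - 1))
--
--
-- def is_valid_hanoi_state(peg_1, peg_2, peg_3, max_disks):
--     all_disks = peg_1 + peg_2 + peg_3
--     distinct = set(all_disks)
--     if len(distinct) != len(all_disks):
--         return False
--     if distinct != set(range(1, max_disks + 1)):
--         return False
--     return all(_strictly_decreasing(p) for p in (peg_1, peg_2, peg_3))
-- ===== Notes on version B (the rewrite author's own statement) =====
-- stated objective: alternative
-- what changed: Replaces the global sorted-vs-range comparison with a duplicate-count plus set-membership test and each per-peg sort-and-compare with a single adjacent-pair scan, removing all sorting.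
import Mathlib
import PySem

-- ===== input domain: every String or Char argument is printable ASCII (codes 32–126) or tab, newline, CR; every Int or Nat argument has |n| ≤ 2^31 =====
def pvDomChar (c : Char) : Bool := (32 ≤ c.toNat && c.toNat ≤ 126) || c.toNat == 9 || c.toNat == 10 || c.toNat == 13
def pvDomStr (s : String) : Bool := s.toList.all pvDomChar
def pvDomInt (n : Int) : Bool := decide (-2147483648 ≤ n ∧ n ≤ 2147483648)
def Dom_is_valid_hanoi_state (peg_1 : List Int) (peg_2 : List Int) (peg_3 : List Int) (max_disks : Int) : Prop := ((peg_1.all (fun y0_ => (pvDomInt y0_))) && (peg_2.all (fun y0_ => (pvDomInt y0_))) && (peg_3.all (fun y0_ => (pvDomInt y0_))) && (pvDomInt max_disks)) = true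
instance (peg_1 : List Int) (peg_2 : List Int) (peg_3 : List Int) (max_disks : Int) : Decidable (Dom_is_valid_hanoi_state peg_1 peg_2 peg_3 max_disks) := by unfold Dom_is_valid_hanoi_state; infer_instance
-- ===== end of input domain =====

-- B replaces A's global sorted-vs-range comparison by a set/length test and each per-peg
-- sort-and-compare by one adjacent-pair scan, removing all sorting (objective: alternative).

-- ===== PORT A =====
def is_valid_hanoi_state (peg_1 : List Int) (peg_2 : List Int) (peg_3 : List Int) (max_disks : Int) : Bool :=
  let all_disks := peg_1 ++ peg_2 ++ peg_3
  if PySem.List.sorted all_disks (fun x => x) false ≠ PySem.List.pyRange 1 (max_disks + 1) 1 then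
    false
  -- 'for peg in [peg_1, peg_2, peg_3]' unrolled over the literal three-element list
  else if peg_1 ≠ PySem.List.sorted peg_1 (fun x => x) true then false
  else if peg_2 ≠ PySem.List.sorted peg_2 (fun x => x) true then false
  else if peg_3 ≠ PySem.List.sorted peg_3 (fun x => x) true then false
  else true

-- ===== PORT B =====
-- all(peg[i] > peg[i+1] for i in range(len(peg)-1)) as the obvious adjacent-pair recursion
def pvStrictDec : List Int → Bool
  | a :: b :: t => decide (a > b) && pvStrictDec (b :: t)
  | _ => true

def is_valid_hanoi_state_alt (peg_1 : List Int) (peg_2 : List Int) (peg_3 : List Int) (max_disks : Int) : Bool :=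
  let all_disks := peg_1 ++ peg_2 ++ peg_3
  let distinct := PySem.Set.ofList all_disks
  if distinct.length ≠ all_disks.length then false
  else if ¬ (PySem.Set.equal distinct (PySem.Set.ofList (PySem.List.pyRange 1 (max_disks + 1) 1)) = true) then false
  else pvStrictDec peg_1 && pvStrictDec peg_2 && pvStrictDec peg_3

-- ===== PRECONDITION & SPEC =====
def Spec_is_valid_hanoi_state (peg_1 : List Int) (peg_2 : List Int) (peg_3 : List Int) (max_disks : Int) (out : Bool) : Prop := out = is_valid_hanoi_state_alt peg_1 peg_2 peg_3 max_disks
instance (peg_1 : List Int) (peg_2 : List Int) (peg_3 : List Int) (max_disks : Int) (out : Bool) : Decidable (Spec_is_valid_hanoi_state peg_1 peg_2 peg_3 max_disks out) := by unfold Spec_is_valid_hanoi_state; infer_instance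

-- ===== CLAIM (what is proved, stated in full; the proofs are below) =====
def Claim_equal_is_valid_hanoi_state : Prop := ∀ (peg_1 : List Int) (peg_2 : List Int) (peg_3 : List Int) (max_disks : Int), Dom_is_valid_hanoi_state peg_1 peg_2 peg_3 max_disks → Spec_is_valid_hanoi_state peg_1 peg_2 peg_3 max_disks (is_valid_hanoi_state peg_1 peg_2 peg_3 max_disks)

-- ===== LEMMAS AND PROOFS =====

theorem pvStrictDec_iff : ∀ (l : List Int), pvStrictDec l = true ↔ l.Pairwise (· > ·)
  | [] => by simp [pvStrictDec]
  | [a] => by simp [pvStrictDec]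
  | a :: b :: t => by
    rw [pvStrictDec]
    simp only [Bool.and_eq_true, decide_eq_true_eq, pvStrictDec_iff (b :: t),
      List.pairwise_cons]
    constructor
    · rintro ⟨hab, hbt⟩
      refine ⟨fun x hx => ?_, hbt⟩
      rcases List.mem_cons.mp hx with rfl | hx
      · exact hab
      · exact lt_trans (hbt.1 x hx) hab
    · rintro ⟨ha, hbt⟩
      exact ⟨ha b (by simp), hbt⟩

-- set(xs) keeps a subsequence of xs (first occurrences, in order)
theorem ofList_sublist (xs : List Int) : (PySem.Set.ofList xs).Sublist xs := by
  induction xs using List.reverseRecOn with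
  | nil => simp [PySem.Set.ofList_nil]
  | append_singleton ys x ih =>
    rw [PySem.Set.ofList_append_singleton, PySem.Set.add_eq_ite]
    split_ifs with h
    · exact ih.trans (List.sublist_append_left _ _)
    · exact List.Sublist.append ih (List.Sublist.refl [x])

theorem nodup_of_len_ofList (xs : List Int) (h : (PySem.Set.ofList xs).length = xs.length) :
    xs.Nodup := by
  have := (ofList_sublist xs).eq_of_length h
  rw [← this]
  exact PySem.Set.nodup_ofList xs

-- A's global check holds iff the disks are a permutation of 1..max_disks
theorem sorted_eq_range_iff (xs : List Int) (m : Int) :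
    PySem.List.sorted xs (fun x => x) false = PySem.List.pyRange 1 (m + 1) 1 ↔
      xs.Perm (PySem.List.pyRange 1 (m + 1) 1) := by
  constructor
  · intro h
    have := PySem.List.sorted_perm xs (fun x => x) false
    rw [h] at this
    exact this.symm
  · intro h
    exact PySem.List.sorted_eq_of_perm_of_pairwise_lt xs _ (fun x => x) h.symm
      (PySem.List.pairwise_lt_pyRange_one 1 (m + 1))

-- B's set/length checks hold iff the disks are a permutation of 1..max_disks
theorem set_checks_iff (xs : List Int) (m : Int) :
    ((PySem.Set.ofList xs).length = xs.length ∧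
      PySem.Set.equal (PySem.Set.ofList xs)
        (PySem.Set.ofList (PySem.List.pyRange 1 (m + 1) 1)) = true) ↔
      xs.Perm (PySem.List.pyRange 1 (m + 1) 1) := by
  have hRnd : (PySem.List.pyRange 1 (m + 1) 1).Nodup := PySem.List.nodup_pyRange_one 1 (m + 1)
  constructor
  · rintro ⟨hlen, heq⟩
    have hnd : xs.Nodup := nodup_of_len_ofList xs hlen
    rw [PySem.Set.equal_iff] at heq
    rw [List.perm_ext_iff_of_nodup hnd hRnd]
    intro a
    have := heq a
    simpa [PySem.Set.mem_ofList] using this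
  · intro h
    have hnd : xs.Nodup := (h.nodup_iff).mpr hRnd
    constructor
    · rw [PySem.Set.ofList_eq_self_of_nodup xs hnd]
    · rw [PySem.Set.equal_iff]
      intro a
      simp [PySem.Set.mem_ofList, h.mem_iff]
  
-- a duplicate-free peg equals its own descending sort iff adjacent pairs strictly decrease
theorem peg_check_iff (peg : List Int) (hnd : peg.Nodup) :
    peg = PySem.List.sorted peg (fun x => x) true ↔ pvStrictDec peg = true := by
  rw [pvStrictDec_iff]
  constructor
  · intro h
    have hp : peg.Pairwise (fun a b : Int => b ≤ a) := by
      rw [h]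
      exact PySem.List.sorted_pairwise_rev peg (fun x => x)
    have := List.Pairwise.and hp hnd
    exact this.imp (fun {a b} hab => lt_of_le_of_ne hab.1 (Ne.symm hab.2))
  · intro h
    exact (PySem.List.sorted_rev_eq_self_of_pairwise peg (fun x => x)
      (h.imp (fun {a b} hab => le_of_lt hab))).symm

theorem main_eq (p1 p2 p3 : List Int) (m : Int) :
    is_valid_hanoi_state p1 p2 p3 m = is_valid_hanoi_state_alt p1 p2 p3 m := by
  unfold is_valid_hanoi_state is_valid_hanoi_state_alt
  set xs := p1 ++ p2 ++ p3 with hxs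
  by_cases hperm : xs.Perm (PySem.List.pyRange 1 (m + 1) 1)
  · have h1 := (sorted_eq_range_iff xs m).mpr hperm
    have h2 := (set_checks_iff xs m).mpr hperm
    have hnd : xs.Nodup := hperm.nodup_iff.mpr (PySem.List.nodup_pyRange_one 1 (m + 1))
    have hnd1 : p1.Nodup := (hnd.of_append_left).of_append_left
    have hnd2 : p2.Nodup := (hnd.of_append_left).of_append_right
    have hnd3 : p3.Nodup := hnd.of_append_right
    rw [if_neg (not_not_intro h1), if_neg (not_not_intro h2.1), if_neg (not_not_intro h2.2)]
    by_cases c1 : pvStrictDec p1 = true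
    · rw [if_neg (not_not_intro ((peg_check_iff p1 hnd1).mpr c1))]
      by_cases c2 : pvStrictDec p2 = true
      · rw [if_neg (not_not_intro ((peg_check_iff p2 hnd2).mpr c2))]
        by_cases c3 : pvStrictDec p3 = true
        · rw [if_neg (not_not_intro ((peg_check_iff p3 hnd3).mpr c3))]
          simp [c1, c2, c3]
        · rw [if_pos (fun h => c3 ((peg_check_iff p3 hnd3).mp h))]
          simp [c3]
      · rw [if_pos (fun h => c2 ((peg_check_iff p2 hnd2).mp h))]
        simp [c2]
    · rw [if_pos (fun h => c1 ((peg_check_iff p1 hnd1).mp h))]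
      simp [c1]
  · have h1 : ¬ PySem.List.sorted xs (fun x => x) false = PySem.List.pyRange 1 (m + 1) 1 :=
      fun h => hperm ((sorted_eq_range_iff xs m).mp h)
    rw [if_pos h1]
    by_cases hlen : (PySem.Set.ofList xs).length = xs.length
    · have heq : ¬ PySem.Set.equal (PySem.Set.ofList xs)
          (PySem.Set.ofList (PySem.List.pyRange 1 (m + 1) 1)) = true :=
        fun h => hperm ((set_checks_iff xs m).mp ⟨hlen, h⟩)
      rw [if_neg (not_not_intro hlen), if_pos heq]
    · rw [if_pos hlen]

-- ===== VERDICT (by name: the statement is the Claim_ definition above) =====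
theorem is_valid_hanoi_state_spec : Claim_equal_is_valid_hanoi_state := by
  intro p1 p2 p3 m _
  unfold Spec_is_valid_hanoi_state
  exact main_eq p1 p2 p3 m
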